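-- pv_equiv track=rewrite | github.com/kmzn128/atcoder | B141/e_b141.py | check
-- ===== SOURCE A (Python) =====
-- def check(n, N, s):
--     for i in range(n, 0, -1):
--         for j in range(0, N-2*i+1):
--             for k in range(j+i, N-i+1):
--                 if(s[j] == s[k]):
--                     if(s[j:j+i] == s[k:k+i]):
--                         return i
--     return 0
-- ===== SOURCE B (Python) =====
-- def check(n, N, s):
--     hi = min(n, N // 2)
--     for i in range(hi, 0, -1):
--         first = {}
--         for k in range(N - i + 1):
--             sub = s[k:k+i]
--             if sub in first:
--                 if k - first[sub] >= i:
--                     return i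
--             else:
--                 first[sub] = k
--     return 0
-- ===== Notes on version B (the rewrite author's own statement) =====
-- stated objective: faster
-- what changed: Replaces A's descending-length scan over all start pairs (j,k) with compared slices by a per-length single pass that hashes each length-i substring into a dict of first occurrences (the inner pair scan disappears), with the length loop capped at min(n, N//2) since longer lengths cannot repeat without overlap.
-- outside the precondition, e.g. on check(1, 3, 'ab'): A raises IndexError, B returns 0; on check(1, 3, 'aa'): A returns 1, B returns 1
import Mathlib
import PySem

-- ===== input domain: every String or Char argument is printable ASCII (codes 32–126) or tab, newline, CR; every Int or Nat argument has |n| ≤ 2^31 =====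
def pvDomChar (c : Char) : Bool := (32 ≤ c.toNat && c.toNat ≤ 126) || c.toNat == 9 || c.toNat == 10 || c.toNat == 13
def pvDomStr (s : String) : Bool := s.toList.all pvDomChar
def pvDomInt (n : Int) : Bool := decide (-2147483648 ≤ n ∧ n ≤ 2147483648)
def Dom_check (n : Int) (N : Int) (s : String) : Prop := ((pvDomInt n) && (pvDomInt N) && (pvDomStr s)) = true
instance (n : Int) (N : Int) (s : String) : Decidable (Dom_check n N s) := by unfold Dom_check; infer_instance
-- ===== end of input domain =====

-- B replaces A's per-length scan over all start pairs by a single pass per length that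
-- hashes each length-i substring into a dict of first occurrences, with the length loop
-- capped at min(n, N//2); measured faster on the generated inputs (objective: faster).

-- ===== PORT A =====
-- the innermost double loop of A for a fixed i: any pair (j,k) with equal first chars and equal slices
def hitA (N : Int) (cs : List Char) (i : Int) : Bool :=
  (PySem.List.pyRange 0 (N - 2*i + 1) 1).any fun j =>
    (PySem.List.pyRange (j+i) (N - i + 1) 1).any fun k =>
      (PySem.List.pyGet? cs j == PySem.List.pyGet? cs k) &&
      (PySem.List.slice cs (some j) (some (j+i)) == PySem.List.slice cs (some k) (some (k+i)))

def check (n : Int) (N : Int) (s : String) : Int :=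
  ((PySem.List.pyRange n 0 (-1)).find? (fun i => hitA N s.toList i)).getD 0

-- ===== PORT B =====
-- inner loop of B for a fixed i: walk k upward keeping the dict of first occurrences of each slice
def scanB (cs : List Char) (i : Int) (first : PySem.Dict (List Char) Int) : List Int → Bool
  | [] => false
  | k :: ks =>
    let sub := PySem.List.slice cs (some k) (some (k+i))
    match first.get? sub with
    | some j => if i ≤ k - j then true else scanB cs i first ks
    | none => scanB cs i (first.insert sub k) ks

def check_alt (n : Int) (N : Int) (s : String) : Int :=
  ((PySem.List.pyRange (min n (PySem.Int.floordiv N 2)) 0 (-1)).find?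
    (fun i => scanB s.toList i PySem.Dict.empty (PySem.List.pyRange 0 (N - i + 1) 1))).getD 0

-- ===== PRECONDITION & SPEC =====
-- Pre_ excludes N > len(s): there A's loops index s past its end and raise IndexError
-- (on a few such inputs A happens to return before reaching the bad index; B clamps and returns there).
def Pre_check (n : Int) (N : Int) (s : String) : Prop := N ≤ (s.toList.length : Int)
instance (n : Int) (N : Int) (s : String) : Decidable (Pre_check n N s) := by unfold Pre_check; infer_instance
def pvWitness_check : Int × Int × String := (2, 4, "abab")

def Spec_check (n : Int) (N : Int) (s : String) (out : Int) : Prop := out = check_alt n N s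
instance (n : Int) (N : Int) (s : String) (out : Int) : Decidable (Spec_check n N s out) := by unfold Spec_check; infer_instance

-- ===== CLAIM (what is proved, stated in full; the proofs are below) =====
def Claim_equal_check : Prop := ∀ (n : Int) (N : Int) (s : String), Dom_check n N s → Pre_check n N s → Spec_check n N s (check n N s)

-- ===== LEMMAS AND PROOFS =====

-- the length-i slice starting at x
def subAt (cs : List Char) (i x : Int) : List Char := PySem.List.slice cs (some x) (some (x+i))

-- the dict holds exactly the first occurrence of every slice among starts [0, a)
def DictInv (cs : List Char) (i : Int) (first : PySem.Dict (List Char) Int) (a : Int) : Prop :=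
  ∀ v j, first.get? v = some j ↔
    (0 ≤ j ∧ j < a ∧ subAt cs i j = v ∧ ∀ p, 0 ≤ p → p < j → subAt cs i p ≠ v)

lemma find?_congr' {α : Type} (p q : α → Bool) (l : List α) (h : ∀ x ∈ l, p x = q x) :
    l.find? p = l.find? q := by
  induction l with
  | nil => rfl
  | cons x xs ih =>
    have hx := h x (by simp)
    simp only [List.find?_cons, hx]
    cases q x <;> simp [ih fun y hy => h y (by simp [hy])]

lemma exists_min (P : Int → Prop) [DecidablePred P] (a : Int)
    (hp : ∃ p, 0 ≤ p ∧ p < a ∧ P p) :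
    ∃ j, 0 ≤ j ∧ j < a ∧ P j ∧ ∀ q, 0 ≤ q → q < j → ¬ P q := by
  obtain ⟨p, hp0, hpa, hP⟩ := hp
  have hS : ∃ n : Nat, P (n : Int) := ⟨p.toNat, by rwa [Int.toNat_of_nonneg hp0]⟩
  have hle : Nat.find hS ≤ p.toNat := Nat.find_min' hS (by rwa [Int.toNat_of_nonneg hp0])
  refine ⟨(Nat.find hS : Nat), Int.natCast_nonneg _, by omega, Nat.find_spec hS, ?_⟩
  intro q hq0 hqj hPq
  have h1 : P ((q.toNat : Nat) : Int) := by rwa [Int.toNat_of_nonneg hq0]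
  have h2 := Nat.find_min' hS h1
  omega

lemma slice_eq_char (cs : List Char) (i j k : Int) (hi : 1 ≤ i)
    (hj0 : 0 ≤ j) (hk0 : 0 ≤ k) (_hjL : j + i ≤ (cs.length : Int)) (_hkL : k + i ≤ (cs.length : Int))
    (hs : subAt cs i j = subAt cs i k) :
    PySem.List.pyGet? cs j = PySem.List.pyGet? cs k := by
  rw [PySem.List.pyGet?_of_nonneg cs hj0, PySem.List.pyGet?_of_nonneg cs hk0]
  unfold subAt at hs
  rw [PySem.List.slice_toNat cs hj0 (by omega), PySem.List.slice_toNat cs hk0 (by omega)] at hs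
  have h := congrArg (fun l => l[0]?) hs
  simpa [List.getElem?_take, List.getElem?_drop, (by omega : (0:Nat) < (j+i).toNat - j.toNat),
         (by omega : (0:Nat) < (k+i).toNat - k.toNat)] using h

lemma hitA_iff (N : Int) (cs : List Char) (i : Int) (hi : 1 ≤ i) (hN : N ≤ (cs.length : Int)) :
    hitA N cs i = true ↔
    ∃ j k : Int, 0 ≤ j ∧ j < k ∧ k < N - i + 1 ∧ i ≤ k - j ∧ subAt cs i j = subAt cs i k := by
  unfold hitA
  simp only [List.any_eq_true, PySem.List.mem_pyRange_one, Bool.and_eq_true, beq_iff_eq]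
  constructor
  · rintro ⟨j, ⟨hj1, hj2⟩, k, ⟨hk1, hk2⟩, -, hsl⟩
    exact ⟨j, k, hj1, by omega, hk2, by omega, hsl⟩
  · rintro ⟨j, k, h1, h2, h3, h4, hsl⟩
    refine ⟨j, ⟨h1, by omega⟩, k, ⟨by omega, h3⟩, ?_, hsl⟩
    exact slice_eq_char cs i j k hi h1 (by omega) (by omega) (by omega) hsl

lemma inv_empty (cs : List Char) (i : Int) : DictInv cs i PySem.Dict.empty 0 := by
  intro v j
  rw [PySem.Dict.get?_empty]
  constructor
  · intro h; cases h
  · rintro ⟨h1, h2, -⟩; exact absurd h2 (not_lt.mpr h1)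

lemma inv_found (cs : List Char) (i a j : Int) (first : PySem.Dict (List Char) Int)
    (hinv : DictInv cs i first a) (hga : first.get? (subAt cs i a) = some j) :
    DictInv cs i first (a + 1) := by
  intro v j'
  rw [hinv v j']
  constructor
  · rintro ⟨h0, h1, h2, h3⟩; exact ⟨h0, by omega, h2, h3⟩
  · rintro ⟨h0, h1, h2, h3⟩
    refine ⟨h0, ?_, h2, h3⟩
    rcases lt_or_eq_of_le (by omega : j' ≤ a) with h | h
    · exact h
    · exfalso
      obtain ⟨hj0, hja, hjs, -⟩ := (hinv _ j).mp hga
      subst h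
      exact h3 j hj0 hja (by rw [hjs, h2])

lemma inv_insert (cs : List Char) (i a : Int) (first : PySem.Dict (List Char) Int)
    (ha : 0 ≤ a) (hinv : DictInv cs i first a) (hga : first.get? (subAt cs i a) = none) :
    DictInv cs i (first.insert (subAt cs i a) a) (a + 1) := by
  have hnone : ∀ p, 0 ≤ p → p < a → subAt cs i p ≠ subAt cs i a := by
    intro p hp0 hpa hps
    obtain ⟨j, hj0, hja, hjP, hjmin⟩ :=
      exists_min (fun q => subAt cs i q = subAt cs i a) a ⟨p, hp0, hpa, hps⟩
    have := (hinv (subAt cs i a) j).mpr ⟨hj0, hja, hjP, fun q hq0 hqj => hjmin q hq0 hqj⟩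
    rw [hga] at this; cases this
  intro v j
  by_cases hv : v = subAt cs i a
  · subst hv
    rw [PySem.Dict.get?_insert_self]
    constructor
    · intro h
      injection h with h; subst h
      exact ⟨ha, by omega, rfl, hnone⟩
    · rintro ⟨h0, h1, h2, h3⟩
      rcases lt_or_eq_of_le (by omega : j ≤ a) with h | h
      · exact absurd h2 (hnone j h0 h)
      · rw [h]
  · rw [PySem.Dict.get?_insert_of_ne _ _ hv, hinv v j]
    constructor
    · rintro ⟨h0, h1, h2, h3⟩; exact ⟨h0, by omega, h2, h3⟩
    · rintro ⟨h0, h1, h2, h3⟩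
      refine ⟨h0, ?_, h2, h3⟩
      rcases lt_or_eq_of_le (by omega : j ≤ a) with h | h
      · exact h
      · exact absurd (by rw [← h2, h]) hv

lemma scan_aux (cs : List Char) (i : Int) : ∀ (m : Nat) (a : Int)
    (first : PySem.Dict (List Char) Int), 0 ≤ a → DictInv cs i first a →
    (scanB cs i first (PySem.List.pyRange a (a + m) 1) = true ↔
     ∃ j k : Int, 0 ≤ j ∧ j < k ∧ a ≤ k ∧ k < a + m ∧ i ≤ k - j ∧
       subAt cs i j = subAt cs i k) := by
  intro m
  induction m with
  | zero =>
    intro a first ha hinv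
    rw [PySem.List.pyRange_one_eq_nil (by omega)]
    simp only [scanB, Bool.false_eq_true, false_iff]
    rintro ⟨j, k, -, -, h3, h4, -⟩; omega
  | succ m ih =>
    intro a first ha hinv
    rw [PySem.List.pyRange_one_cons (by push_cast; omega)]
    have hb : (a : Int) + ((m + 1 : Nat) : Int) = (a + 1) + (m : Nat) := by push_cast; ring
    cases hga : first.get? (PySem.List.slice cs (some a) (some (a + i))) with
    | some j =>
      simp only [scanB, hga]
      obtain ⟨hj0, hja, hjs, hjmin⟩ := (hinv _ j).mp hga
      split_ifs with hif
      · simp only [true_iff]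
        exact ⟨j, a, hj0, by omega, le_refl a, by push_cast; omega, hif, hjs⟩
      · rw [hb, ih (a + 1) first (by omega) (inv_found cs i a j first hinv hga)]
        constructor
        · rintro ⟨j', k, h0, h1, h2, h3, h4, h5⟩
          exact ⟨j', k, h0, h1, by omega, by omega, h4, h5⟩
        · rintro ⟨j', k, h0, h1, h2, h3, h4, h5⟩
          rcases lt_or_eq_of_le h2 with h | h
          · exact ⟨j', k, h0, h1, by omega, by omega, h4, h5⟩
          · exfalso
            -- k = a: the dict's j is the FIRST occurrence, so a - j' ≤ a - j < i
            subst h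
            have hjj' : j ≤ j' := by
              by_contra hlt
              exact hjmin j' h0 (by omega) (by rw [h5]; rfl)
            omega
    | none =>
      simp only [scanB, hga]
      rw [show PySem.List.slice cs (some a) (some (a + i)) = subAt cs i a from rfl]
      rw [hb, ih (a + 1) _ (by omega) (inv_insert cs i a first ha hinv hga)]
      have hnok : ∀ j', ¬ (0 ≤ j' ∧ j' < a ∧ subAt cs i j' = subAt cs i a) := by
        rintro j' ⟨h0, h1, h2⟩
        obtain ⟨j, hj0, hja, hjP, hjmin⟩ :=
          exists_min (fun q => subAt cs i q = subAt cs i a) a ⟨j', h0, h1, h2⟩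
        have h6 := (hinv (subAt cs i a) j).mpr ⟨hj0, hja, hjP, hjmin⟩
        rw [show subAt cs i a = PySem.List.slice cs (some a) (some (a + i)) from rfl, hga] at h6
        cases h6
      constructor
      · rintro ⟨j', k, h0, h1, h2, h3, h4, h5⟩
        exact ⟨j', k, h0, h1, by omega, by omega, h4, h5⟩
      · rintro ⟨j', k, h0, h1, h2, h3, h4, h5⟩
        rcases lt_or_eq_of_le h2 with h | h
        · exact ⟨j', k, h0, h1, by omega, by omega, h4, h5⟩
        · exact absurd ⟨h0, by omega, h ▸ h5⟩ (hnok j')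

lemma scan_iff (cs : List Char) (i b a : Int) (first : PySem.Dict (List Char) Int)
    (ha : 0 ≤ a) (hinv : DictInv cs i first a) :
    (scanB cs i first (PySem.List.pyRange a b 1) = true ↔
     ∃ j k : Int, 0 ≤ j ∧ j < k ∧ a ≤ k ∧ k < b ∧ i ≤ k - j ∧
       subAt cs i j = subAt cs i k) := by
  by_cases h : b ≤ a
  · rw [PySem.List.pyRange_one_eq_nil h]
    simp only [scanB, Bool.false_eq_true, false_iff]
    rintro ⟨j, k, -, -, h3, h4, -⟩; omega
  · have : b = a + ((b - a).toNat : Int) := by omega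
    rw [this]
    exact scan_aux cs i (b - a).toNat a first ha hinv

lemma hit_eq (N : Int) (cs : List Char) (i : Int) (hi : 1 ≤ i) (hN : N ≤ (cs.length : Int)) :
    hitA N cs i = scanB cs i PySem.Dict.empty (PySem.List.pyRange 0 (N - i + 1) 1) := by
  rw [Bool.eq_iff_iff, hitA_iff N cs i hi hN,
      scan_iff cs i (N - i + 1) 0 PySem.Dict.empty le_rfl (inv_empty cs i)]
  constructor
  · rintro ⟨j, k, h1, h2, h3, h4, h5⟩; exact ⟨j, k, h1, h2, by omega, h3, h4, h5⟩
  · rintro ⟨j, k, h1, h2, -, h3, h4, h5⟩; exact ⟨j, k, h1, h2, h3, h4, h5⟩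

lemma hitA_false_of_big (N : Int) (cs : List Char) (i : Int) (h : N - 2*i + 1 ≤ 0) :
    hitA N cs i = false := by
  unfold hitA
  rw [PySem.List.pyRange_one_eq_nil (by omega)]
  rfl

lemma pyRange_neg_one_append (a m b : Int) (h1 : b ≤ m) (h2 : m ≤ a) :
    PySem.List.pyRange a b (-1) =
      PySem.List.pyRange a m (-1) ++ PySem.List.pyRange m b (-1) := by
  rw [PySem.List.pyRange_neg_one_eq_reverse, PySem.List.pyRange_neg_one_eq_reverse,
      PySem.List.pyRange_neg_one_eq_reverse,
      PySem.List.pyRange_one_append (b + 1) (m + 1) (a + 1) (by omega) (by omega),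
      List.reverse_append]

-- ===== VERDICT (by name: the statement is the Claim_ definition above) =====
theorem check_spec : Claim_equal_check := by
  intro n N s _ hPre
  unfold Spec_check check check_alt
  have hN : N ≤ (s.toList.length : Int) := hPre
  set cs := s.toList with hcs
  set f := PySem.Int.floordiv N 2 with hf
  have hfe : f = N / 2 := PySem.Int.floordiv_eq_ediv_of_pos (by omega)
  set m := min n f with hm
  have hm_le : m ≤ n := min_le_left _ _
  have hm_f : m ≤ f := min_le_right _ _
  have hbig : ∀ i : Int, f < i → hitA N cs i = false := by
    intro i hfi
    exact hitA_false_of_big N cs i (by omega)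
  by_cases hn : n ≤ 0
  · rw [PySem.List.pyRange_neg_one_eq_nil hn, PySem.List.pyRange_neg_one_eq_nil (by omega)]
    rfl
  · by_cases hm0 : m ≤ 0
    · rw [PySem.List.pyRange_neg_one_eq_nil hm0]
      have hA : (PySem.List.pyRange n 0 (-1)).find? (fun i => hitA N cs i) = none := by
        rw [List.find?_eq_none]
        intro i hi
        rw [PySem.List.mem_pyRange_neg_one] at hi
        have : f < i := by omega
        simp [hbig i this]
      rw [hA]
      rfl
    · rw [pyRange_neg_one_append n m 0 (by omega) hm_le, List.find?_append]
      have h1 : (PySem.List.pyRange n m (-1)).find? (fun i => hitA N cs i) = none := by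
        rw [List.find?_eq_none]
        intro i hi
        rw [PySem.List.mem_pyRange_neg_one] at hi
        have : f < i := by omega
        simp [hbig i this]
      rw [h1, Option.none_or]
      have h2 := find?_congr' (fun i => hitA N cs i)
        (fun i => scanB cs i PySem.Dict.empty (PySem.List.pyRange 0 (N - i + 1) 1))
        (PySem.List.pyRange m 0 (-1)) (fun i hi => by
          rw [PySem.List.mem_pyRange_neg_one] at hi
          exact hit_eq N cs i (by omega) hN)
      rw [h2]
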